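-- pv_equiv track=rewrite | github.com/matt-kempster/m2c | m2c/asm_instruction.py | parse_quoted
-- ===== SOURCE A (Python) =====
-- from typing import Dict, Iterator, List, Optional, Set, Tuple, Union
--
-- def parse_quoted(elems: List[str], quote_char: str) -> str:
--     ret: str = ""
--     while elems and elems[0] != quote_char:
--         # Handle backslash-escaped characters
--         # We only need to care about \\, \" and \' in this context.
--         if elems[0] == "\\":
--             elems.pop(0)
--             if not elems:
--                 break
--         ret += elems.pop(0)
--     return ret
-- ===== SOURCE B (Python) =====
-- def parse_quoted(elems, quote_char):
--     n = len(elems)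
--     out = []
--     i = 0
--     while i < n:
--         x = elems[i]
--         if x == quote_char:
--             break
--         if x == "\\":
--             i += 1
--             if i >= n:
--                 break
--             x = elems[i]
--         out.append(x)
--         i += 1
--     del elems[:i]
--     return "".join(out)
-- ===== Notes on version B (the rewrite author's own statement) =====
-- stated objective: faster
-- what changed: Replaces the repeated pop(0) (linear shifts) and string += accumulation with an index scan collecting pieces in a list, one del slice for the same in-place consumption, and a single join.
import Mathlib
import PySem

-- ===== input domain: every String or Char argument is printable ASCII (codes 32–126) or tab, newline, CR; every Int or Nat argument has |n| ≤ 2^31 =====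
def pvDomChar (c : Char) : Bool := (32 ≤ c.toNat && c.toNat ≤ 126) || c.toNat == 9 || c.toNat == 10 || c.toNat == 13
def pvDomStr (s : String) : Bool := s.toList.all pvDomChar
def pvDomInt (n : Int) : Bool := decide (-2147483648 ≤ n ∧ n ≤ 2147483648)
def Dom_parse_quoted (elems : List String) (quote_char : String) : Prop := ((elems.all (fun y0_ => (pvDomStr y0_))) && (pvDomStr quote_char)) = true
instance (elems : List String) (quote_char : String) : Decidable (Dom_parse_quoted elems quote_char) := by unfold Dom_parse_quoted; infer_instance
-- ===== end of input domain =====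

-- B replaces A's pop(0)/+= quadratic loop by a linear index scan with one final join;
-- both Pythons consume the parsed prefix of `elems` in place identically; the theorem is about the return value.

-- ===== PORT A =====
-- A's while loop: recursion on the list, `ret` accumulated by string concatenation.
def parse_quoted_go (elems : List String) (quote_char : String) (ret : String) : String :=
  match elems with
  | [] => ret
  | x :: rest =>
    if x = quote_char then ret
    else if x = "\\" then
      match rest with
      | [] => ret
      | y :: rest' => parse_quoted_go rest' quote_char (ret ++ y)
    else parse_quoted_go rest quote_char (ret ++ x)

def parse_quoted (elems : List String) (quote_char : String) : String :=
  parse_quoted_go elems quote_char ""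

-- ===== PORT B =====
-- B's index loop over the fixed list, collecting pieces in `out`, joined once at the end.
def parse_quoted_alt_go (elems : List String) (quote_char : String) (n i : Nat) (out : List String) : List String :=
  if _h : i < n then
    let x := elems.getD i ""
    if x = quote_char then out
    else if x = "\\" then
      if _h2 : i + 1 < n then
        parse_quoted_alt_go elems quote_char n (i + 2) (out ++ [elems.getD (i + 1) ""])
      else out
    else parse_quoted_alt_go elems quote_char n (i + 1) (out ++ [x])
  else out
termination_by n - i

def parse_quoted_alt (elems : List String) (quote_char : String) : String :=
  String.join (parse_quoted_alt_go elems quote_char elems.length 0 [])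

-- ===== PRECONDITION & SPEC =====
def Spec_parse_quoted (elems : List String) (quote_char : String) (out : String) : Prop := out = parse_quoted_alt elems quote_char
instance (elems : List String) (quote_char : String) (out : String) : Decidable (Spec_parse_quoted elems quote_char out) := by unfold Spec_parse_quoted; infer_instance

-- ===== CLAIM (what is proved, stated in full; the proofs are below) =====
def Claim_equal_parse_quoted : Prop := ∀ (elems : List String) (quote_char : String), Dom_parse_quoted elems quote_char → Spec_parse_quoted elems quote_char (parse_quoted elems quote_char)

-- ===== LEMMAS AND PROOFS =====

theorem join_snoc (out : List String) (x : String) :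
    String.join (out ++ [x]) = String.join out ++ x := by
  simp [String.join]

theorem alt_go_eq (elems : List String) (quote_char : String) :
    ∀ i out, i ≤ elems.length →
      String.join (parse_quoted_alt_go elems quote_char elems.length i out)
        = parse_quoted_go (elems.drop i) quote_char (String.join out) := by
  intro i out hi
  induction hn : elems.length - i using Nat.strong_induction_on generalizing i out with
  | _ k ih =>
  subst hn
  by_cases h : i < elems.length
  · have hdrop := List.drop_eq_getElem_cons h
    have hgd : elems.getD i "" = elems[i] := List.getD_eq_getElem _ _ h
    rw [parse_quoted_alt_go, dif_pos h, parse_quoted_go.eq_def, hdrop]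
    simp only [hgd]
    by_cases hq : elems[i] = quote_char
    · rw [if_pos hq, if_pos hq]
    · rw [if_neg hq, if_neg hq]
      by_cases hb : elems[i] = "\\"
      · rw [if_pos hb, if_pos hb]
        by_cases h2 : i + 1 < elems.length
        · have hdrop2 := List.drop_eq_getElem_cons h2
          have hgd2 : elems.getD (i + 1) "" = elems[i + 1] := List.getD_eq_getElem _ _ h2
          rw [dif_pos h2, hdrop2]
          simp only [hgd2]
          rw [ih (elems.length - (i + 2)) (by omega) (i + 2) (out ++ [elems[i + 1]]) (by omega) rfl,
              join_snoc]
        · rw [dif_neg h2]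
          have hnil : elems.drop (i + 1) = [] := List.drop_eq_nil_of_le (by omega)
          rw [hnil]
      · rw [if_neg hb, if_neg hb]
        rw [ih (elems.length - (i + 1)) (by omega) (i + 1) (out ++ [elems[i]]) (by omega) rfl,
            join_snoc]
  · have hi' : i = elems.length := by omega
    rw [parse_quoted_alt_go, dif_neg h]
    simp [hi', List.drop_length, parse_quoted_go]

-- ===== VERDICT (by name: the statement is the Claim_ definition above) =====
theorem parse_quoted_spec : Claim_equal_parse_quoted := by
  intro elems quote_char _
  unfold Spec_parse_quoted parse_quoted parse_quoted_alt
  rw [alt_go_eq elems quote_char 0 [] (by omega)]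
  simp [String.join]
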